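-- pv_equiv track=rewrite | github.com/yshklarov/landau | landau.py | gen_candidates
-- ===== SOURCE A (Python) =====
-- import itertools
-- import math
--
-- def is_prime(n):
--     if n <= 1:
--         return False
--     for k in range(2, int(math.sqrt(n)+0.5) + 1):
--         if n % k == 0:
--             return False
--     return True
--
-- def primes():
--     return filter(is_prime, itertools.count(2))
--
-- def capped_product(n, *args):
--     # Like a cartesian product, but allows skipping a set, and
--     # returns only elements whose sum is below n.
--     # capped_product(6, [1, 2], [5]) == [[], [5], [1], [1, 5], [2]]
--     if (n < 0):
--         return []
--     if len(args) == 0: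
--         return [[]]
--     # Skip the first pool
--     result = capped_product(n, *args[1:])
--     for i in args[0]:
--         result += map(lambda rest: [i] + rest,
--                       capped_product(n - i, *args[1:]))
--     return result
--
-- def gen_candidates(n):
--     def powers_until(p, max):
--         # We skip 1's, they are useless.
--         return list(
--             itertools.takewhile(lambda k: k <= n,
--                                 map(lambda j: p**j, itertools.count(1))))
--     small_primes = itertools.takewhile(lambda p: p <= n, primes())
--     prime_powers_grid = [powers_until(p, n) for p in small_primes]
--     for valid_list in capped_product(n, *prime_powers_grid):
--         yield tuple(filter(lambda x: x != 0, valid_list))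
-- ===== SOURCE B (Python) =====
-- import math
--
-- def gen_candidates(n):
--     # DP over budgets: table[b] = capped-product lists for budget b over remaining pools,
--     # built once per pool instead of recomputing subtrees exponentially.
--     if n < 0:
--         return
--     pools = []
--     for p in range(2, n + 1):
--         if p >= 2 and all(p % d for d in range(2, math.isqrt(p) + 1)):
--             powers = []
--             pw = p
--             while pw <= n:
--                 powers.append(pw)
--                 pw *= p
--             pools.append(powers)
--     table = [[[]] for _ in range(n + 1)]
--     for pool in reversed(pools):
--         new = []
--         for b in range(n + 1):
--             cur = list(table[b])
--             for i in pool: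
--                 if i <= b:
--                     cur += [[i] + rest for rest in table[b - i]]
--             new.append(cur)
--         table = new
--     for v in table[n]:
--         yield tuple(v)
-- ===== Notes on version B (the rewrite author's own statement) =====
-- stated objective: alternative
-- what changed: Replaces capped_product's top-down recursion, which re-enumerates the same suffix-pool subproblems once per element of every pool, by a bottom-up dynamic-programming table indexed by remaining budget 0..n, built once per prime-power pool and read off at budget n.
import Mathlib
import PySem

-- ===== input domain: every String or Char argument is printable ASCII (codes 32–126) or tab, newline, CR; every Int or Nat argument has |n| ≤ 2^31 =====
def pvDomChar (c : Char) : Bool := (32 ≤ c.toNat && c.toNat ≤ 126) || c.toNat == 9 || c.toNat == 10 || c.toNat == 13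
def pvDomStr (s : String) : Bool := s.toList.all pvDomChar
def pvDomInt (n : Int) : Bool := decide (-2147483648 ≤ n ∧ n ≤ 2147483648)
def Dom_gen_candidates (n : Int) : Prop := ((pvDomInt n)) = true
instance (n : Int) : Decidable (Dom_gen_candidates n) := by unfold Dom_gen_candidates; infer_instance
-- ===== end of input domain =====

-- B replaces A's exponentially self-recomputing capped_product recursion by a bottom-up
-- budget-indexed DP table built once per prime-power pool (objective: alternative algorithm).

-- ===== PORT A =====

-- int(math.sqrt(n)+0.5) = the integer nearest to √n; exact for 2 ≤ n ≤ 2^31 (double sqrt of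
-- such ints is correctly rounded and √n never lands exactly on a half-integer).
def pyIsqrtRound (n : Int) : Int :=
  let r : Int := (Nat.sqrt n.toNat : Int)
  if n ≤ r * r + r then r else r + 1

-- is_prime(n): for k in range(2, int(math.sqrt(n)+0.5)+1): if n % k == 0: return False
def is_prime (n : Int) : Bool :=
  if n ≤ 1 then false
  else (PySem.List.pyRange 2 (pyIsqrtRound n + 1)).all (fun k => !(PySem.Int.mod n k == 0))

-- powers_until: takewhile(≤ n) over p**j for j = 1, 2, …  (fuel n.toNat+1 suffices: p ≥ 2,
-- so at most log₂ n powers are ≤ n)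
def powersUntilGo (p nn : Int) (j : Nat) : Nat → List Int
  | 0 => []
  | fuel + 1 => if p ^ j ≤ nn then p ^ j :: powersUntilGo p nn (j + 1) fuel else []

def powers_until (p nn : Int) : List Int := powersUntilGo p nn 1 (nn.toNat + 1)

-- inner 'for i in args[0]: result += map(lambda rest: [i] + rest, capped_product(n - i, *args[1:]))'
def cpLoop (f : Int → List (List Int)) (n : Int) : List Int → List (List Int) → List (List Int)
  | [], acc => acc
  | i :: is, acc => cpLoop f n is (acc ++ (f (n - i)).map (fun rest => i :: rest))

def cappedProduct : Int → List (List Int) → List (List Int)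
  | n, pools =>
    if n < 0 then []
    else
      match pools with
      | [] => [[]]
      | pool :: rest => cpLoop (fun m => cappedProduct m rest) n pool (cappedProduct n rest)
  termination_by _ pools => pools.length

-- takewhile(p ≤ n, primes()) = exactly the primes in [2, n] (primes() enumerates them increasingly)
def prime_powers_grid (n : Int) : List (List Int) :=
  ((PySem.List.pyRange 2 (n + 1)).filter is_prime).map (fun p => powers_until p n)

def gen_candidates (n : Int) : List (List Int) :=
  (cappedProduct n (prime_powers_grid n)).map (fun l => l.filter (fun x => !(x == 0)))

-- ===== PORT B =====

-- m >= 2 and all(m % d for d in range(2, math.isqrt(m) + 1))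
def is_prime_alt (m : Int) : Bool :=
  decide (2 ≤ m) && (PySem.List.pyRange 2 ((Nat.sqrt m.toNat : Int) + 1)).all
    (fun d => !(PySem.Int.mod m d == 0))

-- pw = p; while pw <= n: append pw; pw *= p   (fuel n.toNat+1 suffices, see powersUntilGo)
def powersGoB (nn p pw : Int) : Nat → List Int
  | 0 => []
  | fuel + 1 => if pw ≤ nn then pw :: powersGoB nn p (pw * p) fuel else []

def poolsB (n : Int) : List (List Int) :=
  (PySem.List.pyRange 2 (n + 1)).foldl
    (fun acc p => if is_prime_alt p then acc ++ [powersGoB n p p (n.toNat + 1)] else acc) []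

-- for i in pool: if i <= b: cur += [[i] + rest for rest in table[b - i]]
def altPoolLoop (table : List (List (List Int))) (b : Int) :
    List Int → List (List Int) → List (List Int)
  | [], cur => cur
  | i :: is, cur =>
      altPoolLoop table b is
        (if i ≤ b then cur ++ (PySem.List.pyGetD table (b - i) []).map (fun rest => i :: rest)
         else cur)

-- new = [row for b in range(n + 1)]
def altRow (n : Int) (table : List (List (List Int))) (pool : List Int) :
    List (List (List Int)) :=
  (PySem.List.pyRange 0 (n + 1)).map (fun b => altPoolLoop table b pool (PySem.List.pyGetD table b []))

def gen_candidates_alt (n : Int) : List (List Int) :=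
  if n < 0 then []
  else
    PySem.List.pyGetD
      ((poolsB n).reverse.foldl (fun t pool => altRow n t pool)
        ((PySem.List.pyRange 0 (n + 1)).map (fun _ => [[]]))) n []

-- ===== PRECONDITION & SPEC =====
def Spec_gen_candidates (n : Int) (out : List (List Int)) : Prop := out = gen_candidates_alt n
instance (n : Int) (out : List (List Int)) : Decidable (Spec_gen_candidates n out) := by unfold Spec_gen_candidates; infer_instance

-- ===== CLAIM (what is proved, stated in full; the proofs are below) =====
def Claim_equal_gen_candidates : Prop := ∀ (n : Int), Dom_gen_candidates n → Spec_gen_candidates n (gen_candidates n)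

-- ===== LEMMAS AND PROOFS =====

theorem cappedProduct_neg (n : Int) (pools : List (List Int)) (h : n < 0) :
    cappedProduct n pools = [] := by
  rw [cappedProduct.eq_def]
  simp [h]

theorem cappedProduct_cons (n : Int) (hn : 0 ≤ n) (pool : List Int) (rest : List (List Int)) :
    cappedProduct n (pool :: rest)
      = cpLoop (fun m => cappedProduct m rest) n pool (cappedProduct n rest) := by
  rw [cappedProduct.eq_def]
  simp [show ¬ n < 0 by omega]

theorem cappedProduct_nil (n : Int) (hn : 0 ≤ n) : cappedProduct n [] = [[]] := by
  rw [cappedProduct.eq_def]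
  simp [show ¬ n < 0 by omega]

-- The two primality tests agree on every p ≥ 2: A's trial-division bound int(√p+0.5) is
-- isqrt(p) or isqrt(p)+1, and in the latter case isqrt(p)+1 never divides p.
theorem is_prime_alt_eq (p : Int) (hp : 2 ≤ p) : is_prime_alt p = is_prime p := by
  have hcast : ((p.toNat : Int)) = p := by omega
  set r : Int := (Nat.sqrt p.toNat : Int) with hrdef
  have hr1 : r * r ≤ p := by
    calc r * r = ((Nat.sqrt p.toNat ^ 2 : Nat) : Int) := by push_cast; ring
      _ ≤ ((p.toNat : Int)) := by exact_mod_cast Nat.sqrt_le' p.toNat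
      _ = p := hcast
  have hr2 : p < (r + 1) * (r + 1) := by
    calc p = ((p.toNat : Int)) := hcast.symm
      _ < (((Nat.sqrt p.toNat).succ ^ 2 : Nat) : Int) := by exact_mod_cast Nat.lt_succ_sqrt' p.toNat
      _ = (r + 1) * (r + 1) := by push_cast; ring
  have hrnn : 0 ≤ r := Int.natCast_nonneg _
  have hr0 : 1 ≤ r := by
    by_contra h
    have hz : r = 0 := by omega
    rw [hz] at hr2
    norm_num at hr2
    omega
  have hbound : pyIsqrtRound p = if p ≤ r * r + r then r else r + 1 := rfl
  unfold is_prime_alt is_prime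
  rw [if_neg (show ¬ p ≤ 1 by omega), hbound, ← hrdef]
  by_cases hc : p ≤ r * r + r
  · rw [if_pos hc]
    simp [hp]
  · rw [if_neg hc]
    rw [PySem.List.pyRange_one_succ_right (show (2:Int) ≤ r + 1 by omega)]
    rw [List.all_append]
    have hdvd : ¬ ((r + 1) ∣ p) := by
      rintro ⟨q, hq⟩
      have hq1 : 1 ≤ q := by
        by_contra h
        have hle : (r + 1) * q ≤ 0 := mul_nonpos_of_nonneg_of_nonpos (by omega) (by omega)
        omega
      have hqr : q ≤ r := by
        by_contra h
        have hge : (r + 1) * (r + 1) ≤ (r + 1) * q :=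
          mul_le_mul_of_nonneg_left (by omega) (by omega)
        omega
      have hle : (r + 1) * q ≤ (r + 1) * r := mul_le_mul_of_nonneg_left hqr (by omega)
      have : (r + 1) * r = r * r + r := by ring
      omega
    have hmod : (PySem.Int.mod p (r + 1) == 0) = false := by
      rw [beq_eq_false_iff_ne]
      intro h
      exact hdvd ((PySem.Int.mod_eq_zero_iff_dvd p (r + 1)).mp h)
    simp [hp, hmod]

-- The two power-list constructions agree.
theorem powersGo_eq (p nn : Int) (j : Nat) (fuel : Nat) :
    powersUntilGo p nn j fuel = powersGoB nn p (p ^ j) fuel := by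
  induction fuel generalizing j with
  | zero => rfl
  | succ fuel ih =>
      simp only [powersUntilGo, powersGoB, ← pow_succ, ih (j + 1)]

-- B's pool grid is A's grid.
theorem poolsB_eq (n : Int) : poolsB n = prime_powers_grid n := by
  unfold poolsB prime_powers_grid
  rw [PySem.List.foldl_append_if is_prime_alt (fun p => powersGoB n p p (n.toNat + 1))]
  rw [List.nil_append]
  rw [List.filter_congr (fun p hp => by
    rw [is_prime_alt_eq p (PySem.List.mem_pyRange_one.mp hp).1])]
  apply List.map_congr_left
  intro p _
  have h := powersGo_eq p n 1 (n.toNat + 1)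
  rw [pow_one] at h
  exact h.symm

theorem powersUntilGo_pos (p nn : Int) (hp : 0 < p) :
    ∀ (fuel : Nat) (j : Nat), ∀ i ∈ powersUntilGo p nn j fuel, 0 < i := by
  intro fuel
  induction fuel with
  | zero => intro j i hi; simp [powersUntilGo] at hi
  | succ fuel ih =>
      intro j i hi
      simp only [powersUntilGo] at hi
      split at hi
      · rcases List.mem_cons.mp hi with h | h
        · exact h ▸ pow_pos hp j
        · exact ih (j + 1) i h
      · simp at hi

-- Every element of every pool of A's grid is positive.
theorem grid_pos (n : Int) : ∀ pool ∈ prime_powers_grid n, ∀ i ∈ pool, 0 < i := by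
  intro pool hpool i hi
  unfold prime_powers_grid at hpool
  rcases List.mem_map.mp hpool with ⟨p, hp, rfl⟩
  have h2 : (2 : Int) ≤ p := (PySem.List.mem_pyRange_one.mp (List.mem_of_mem_filter hp)).1
  exact powersUntilGo_pos p n (by omega) _ _ i hi

-- cpLoop in closed form.
theorem cpLoop_eq (f : Int → List (List Int)) (n : Int) (pool : List Int)
    (acc : List (List Int)) :
    cpLoop f n pool acc = acc ++ pool.flatMap (fun i => (f (n - i)).map (fun r => i :: r)) := by
  induction pool generalizing acc with
  | nil => simp [cpLoop]
  | cons i is ih => simp [cpLoop, ih, List.append_assoc]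

-- index into a row built as '[f(b) for b in range(n+1)]'
theorem pyGetD_row (n : Int) (hn : 0 ≤ n) (f : Int → List (List Int)) (b : Int)
    (hb0 : 0 ≤ b) (hbn : b ≤ n) :
    PySem.List.pyGetD ((PySem.List.pyRange 0 (n + 1)).map f) b [] = f b := by
  have h1 : n + 1 = ((n.toNat + 1 : Nat) : Int) := by omega
  have h2 : b = ((b.toNat : Nat) : Int) := by omega
  rw [h1, h2, PySem.List.pyGetD_map_pyRange f (n.toNat + 1) b.toNat [] (by omega)]

-- one pass of B's inner pool loop = one level of A's cpLoop, given the table tabulates rest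
theorem altLoop_eq (n : Int) (rest : List (List Int)) (table : List (List (List Int)))
    (htab : ∀ c : Int, 0 ≤ c → c ≤ n → PySem.List.pyGetD table c [] = cappedProduct c rest)
    (b : Int) (_hb0 : 0 ≤ b) (hbn : b ≤ n) :
    ∀ (pool : List Int), (∀ i ∈ pool, 0 < i) → ∀ (acc : List (List Int)),
      altPoolLoop table b pool acc = cpLoop (fun m => cappedProduct m rest) b pool acc := by
  intro pool
  induction pool with
  | nil => intro _ acc; rfl
  | cons i is ih =>
      intro hpos acc
      have hipos : 0 < i := hpos i List.mem_cons_self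
      simp only [altPoolLoop, cpLoop]
      by_cases hib : i ≤ b
      · rw [if_pos hib, htab (b - i) (by omega) (by omega)]
        exact ih (fun j hj => hpos j (List.mem_cons_of_mem _ hj)) _
      · rw [if_neg hib, cappedProduct_neg (b - i) rest (by omega)]
        rw [List.map_nil, List.append_nil]
        exact ih (fun j hj => hpos j (List.mem_cons_of_mem _ hj)) _

-- The DP table, folded from the right, tabulates cappedProduct at every budget 0..n.
theorem dp_correct (n : Int) (hn : 0 ≤ n) (pools : List (List Int))
    (hpos : ∀ pool ∈ pools, ∀ i ∈ pool, 0 < i) (b : Int) (hb0 : 0 ≤ b) (hbn : b ≤ n) :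
    PySem.List.pyGetD
      (pools.foldr (fun pool t => altRow n t pool)
        ((PySem.List.pyRange 0 (n + 1)).map (fun _ => ([] : List Int) :: []))) b []
      = cappedProduct b pools := by
  induction pools generalizing b with
  | nil =>
      simp only [List.foldr_nil]
      rw [pyGetD_row n hn _ b hb0 hbn, cappedProduct_nil b hb0]
  | cons pool rest ih =>
      simp only [List.foldr_cons]
      rw [show altRow n (rest.foldr (fun pool t => altRow n t pool)
            ((PySem.List.pyRange 0 (n + 1)).map (fun _ => ([] : List Int) :: []))) pool
          = (PySem.List.pyRange 0 (n + 1)).map (fun b =>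
              altPoolLoop (rest.foldr (fun pool t => altRow n t pool)
                ((PySem.List.pyRange 0 (n + 1)).map (fun _ => ([] : List Int) :: []))) b pool
                (PySem.List.pyGetD (rest.foldr (fun pool t => altRow n t pool)
                  ((PySem.List.pyRange 0 (n + 1)).map (fun _ => ([] : List Int) :: []))) b []))
          from rfl]
      rw [pyGetD_row n hn _ b hb0 hbn]
      rw [ih (fun q hq => hpos q (List.mem_cons_of_mem _ hq)) b hb0 hbn]
      rw [altLoop_eq n rest _
            (fun c hc0 hcn => ih (fun q hq => hpos q (List.mem_cons_of_mem _ hq)) c hc0 hcn)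
            b hb0 hbn pool (hpos pool List.mem_cons_self) _]
      exact (cappedProduct_cons b hb0 pool rest).symm

-- No zero ever occurs in a cappedProduct list over positive pools, so A's filter is the identity.
theorem filter_capped (pools : List (List Int)) (hpos : ∀ pool ∈ pools, ∀ i ∈ pool, 0 < i) :
    ∀ (n : Int) (l : List Int), l ∈ cappedProduct n pools →
      l.filter (fun x => !(x == 0)) = l := by
  induction pools with
  | nil =>
      intro n l hl
      by_cases hneg : n < 0
      · rw [cappedProduct_neg _ _ hneg] at hl; simp at hl
      · rw [cappedProduct_nil n (by omega)] at hl
        simp at hl; subst hl; rfl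
  | cons pool rest ih =>
      intro n l hl
      by_cases hneg : n < 0
      · rw [cappedProduct_neg _ _ hneg] at hl; simp at hl
      · rw [cappedProduct_cons n (by omega)] at hl
        rw [cpLoop_eq] at hl
        rcases List.mem_append.mp hl with h | h
        · exact ih (fun q hq => hpos q (List.mem_cons_of_mem _ hq)) n l h
        · rcases List.mem_flatMap.mp h with ⟨i, hi, hmem⟩
          rcases List.mem_map.mp hmem with ⟨r, hr, rfl⟩
          have hipos : 0 < i := hpos pool (List.mem_cons_self) i hi
          have hr' := ih (fun q hq => hpos q (List.mem_cons_of_mem _ hq)) (n - i) r hr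
          simp only [List.filter_cons]
          rw [hr']
          simp [show i ≠ 0 by omega]

-- ===== VERDICT (by name: the statement is the Claim_ definition above) =====
theorem gen_candidates_spec : Claim_equal_gen_candidates := by
  intro n _
  unfold Spec_gen_candidates gen_candidates gen_candidates_alt
  by_cases hn : n < 0
  · rw [if_pos hn, cappedProduct_neg _ _ hn, List.map_nil]
  · rw [if_neg hn]
    rw [Int.not_lt] at hn
    rw [List.foldl_reverse, poolsB_eq, dp_correct n hn _ (grid_pos n) n hn le_rfl]
    have := filter_capped (prime_powers_grid n) (grid_pos n)
    calc (cappedProduct n (prime_powers_grid n)).map (fun l => l.filter (fun x => !(x == 0)))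
        = (cappedProduct n (prime_powers_grid n)).map id := by
          apply List.map_congr_left
          intro l hl
          exact this n l hl
      _ = cappedProduct n (prime_powers_grid n) := List.map_id _
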